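-- pv_equiv track=rewrite | github.com/BayMinimum/problem-solving-robot | codejam/2019-1B/A.py | solve
-- ===== SOURCE A (Python) =====
-- def solve(Q, U, D):
--     C = [0]
--     for u in U:
--         if u < Q:
--             C.append(u+1)
--     for d in D:
--         if d > 0:
--             C.append(d-1)
--     C.sort()
--     ret, pop = 0, 0
--     for c in C:
--         p = 0
--         for u in U:
--             if u < c:
--                 p += 1
--         for d in D:
--             if d > c:
--                 p += 1
--         if p > pop:
--             ret, pop = c, p
--     return ret
-- ===== SOURCE B (Python) =====
-- def _prefix_len(xs, pred):
--     # xs is sorted so that pred holds on a prefix; binary search for its length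
--     lo, hi = 0, len(xs)
--     while lo < hi:
--         mid = (lo + hi) // 2
--         if pred(xs[mid]):
--             lo = mid + 1
--         else:
--             hi = mid
--     return lo
--
-- def solve(Q, U, D):
--     su = sorted(U)
--     sd = sorted(D)
--     cands = sorted([0] + [u + 1 for u in U if u < Q] + [d - 1 for d in D if d > 0])
--     ret, pop = 0, 0
--     for c in cands:
--         p = _prefix_len(su, lambda x: x < c) + len(sd) - _prefix_len(sd, lambda x: x <= c)
--         if p > pop:
--             ret, pop = c, p
--     return ret
-- ===== Notes on version B (the rewrite author's own statement) =====
-- stated objective: faster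
-- what changed: B sorts U and D once and counts satisfied constraints per candidate threshold with binary searches (hand-written prefix-length search), replacing A's linear scans of U and D inside the candidate loop.
import Mathlib
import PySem

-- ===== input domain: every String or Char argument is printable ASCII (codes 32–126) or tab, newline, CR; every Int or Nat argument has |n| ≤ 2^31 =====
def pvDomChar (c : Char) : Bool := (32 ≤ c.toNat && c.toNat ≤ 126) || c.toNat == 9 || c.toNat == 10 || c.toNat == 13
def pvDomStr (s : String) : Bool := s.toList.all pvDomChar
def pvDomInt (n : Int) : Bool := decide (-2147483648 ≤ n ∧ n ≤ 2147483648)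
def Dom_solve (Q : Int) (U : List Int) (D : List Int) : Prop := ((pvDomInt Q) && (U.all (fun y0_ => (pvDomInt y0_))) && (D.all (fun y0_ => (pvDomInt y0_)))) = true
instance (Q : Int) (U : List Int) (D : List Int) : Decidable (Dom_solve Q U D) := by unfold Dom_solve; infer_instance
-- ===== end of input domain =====

-- B replaces A's O(n) inner counting scans per candidate by binary searches on
-- pre-sorted copies of U and D (O((n+m) log(n+m)) instead of O((n+m)^2)).

-- ===== PORT A =====
def solve (Q : Int) (U : List Int) (D : List Int) : Int :=
  ((PySem.List.sorted
      (D.foldl (fun acc d => if d > 0 then acc ++ [d - 1] else acc)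
        (U.foldl (fun acc u => if u < Q then acc ++ [u + 1] else acc) [0]))
      (fun x => x) false).foldl
    (fun (s : Int × Int) c =>
      let p := D.foldl (fun p d => if d > c then p + 1 else p)
                 (U.foldl (fun p u => if u < c then p + 1 else p) (0 : Int))
      if p > s.2 then (c, p) else s) ((0 : Int), (0 : Int))).1

-- ===== PORT B =====
-- Source B's `_prefix_len` while-loop; `lo`/`hi` are nonneg Python ints, so Nat and
-- `(lo+hi)//2` is Nat division.  `xs[mid]` has 0 ≤ mid < len(xs) whenever
-- hi ≤ len(xs), so `getD mid 0` is exact there.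
def prefixLenAux (xs : List Int) (pred : Int → Bool) (lo hi : Nat) : Nat :=
  if h : lo < hi then
    let mid := (lo + hi) / 2
    if pred (xs.getD mid 0) then prefixLenAux xs pred (mid + 1) hi
    else prefixLenAux xs pred lo mid
  else lo
termination_by hi - lo
decreasing_by all_goals omega

def prefixLen (xs : List Int) (pred : Int → Bool) : Nat :=
  prefixLenAux xs pred 0 xs.length

def solve_alt (Q : Int) (U : List Int) (D : List Int) : Int :=
  let su := PySem.List.sorted U (fun x => x) false
  let sd := PySem.List.sorted D (fun x => x) false
  ((PySem.List.sorted
      ([0] ++ (U.filter (fun u => decide (u < Q))).map (fun u => u + 1)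
           ++ (D.filter (fun d => decide (d > 0))).map (fun d => d - 1))
      (fun x => x) false).foldl
    (fun (s : Int × Int) c =>
      let p : Int := (prefixLen su (fun x => decide (x < c)) : Int)
                     + (sd.length : Int)
                     - (prefixLen sd (fun x => decide (x ≤ c)) : Int)
      if p > s.2 then (c, p) else s) ((0 : Int), (0 : Int))).1

-- ===== PRECONDITION & SPEC =====
def Spec_solve (Q : Int) (U : List Int) (D : List Int) (out : Int) : Prop := out = solve_alt Q U D
instance (Q : Int) (U : List Int) (D : List Int) (out : Int) : Decidable (Spec_solve Q U D out) := by unfold Spec_solve; infer_instance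

-- ===== CLAIM (what is proved, stated in full; the proofs are below) =====
def Claim_equal_solve : Prop := ∀ (Q : Int) (U : List Int) (D : List Int), Dom_solve Q U D → Spec_solve Q U D (solve Q U D)

-- ===== LEMMAS AND PROOFS =====

-- If pred holds on exactly the first n positions of xs, then countP pred xs = n.
lemma countP_eq_of_iff (xs : List Int) (pred : Int → Bool) :
    ∀ n : Nat, n ≤ xs.length →
      (∀ i (h : i < xs.length), (pred xs[i] = true ↔ i < n)) →
      xs.countP pred = n := by
  induction xs with
  | nil => intro n hn _; simp at hn; simp [hn]
  | cons x t ih =>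
    intro n hn hiff
    cases n with
    | zero =>
      have hx : pred x = false := by
        have := hiff 0 (by simp)
        simpa using this
      have ht : t.countP pred = 0 := by
        apply ih 0 (by omega)
        intro i h
        have := hiff (i + 1) (by simp; omega)
        simpa using this
      simp [hx, ht]
    | succ m =>
      have hx : pred x = true := by
        have := hiff 0 (by simp)
        simpa using this
      have ht : t.countP pred = m := by
        apply ih m (by simpa using hn)
        intro i h
        have := hiff (i + 1) (by simp; omega)
        simpa [Nat.succ_lt_succ_iff] using this
      simp [hx, ht]

-- Correctness of Source B's binary search: with pred index-downward-closed on xs and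
-- the invariant "true before lo, false from hi on", it returns countP pred xs.
lemma prefixLenAux_eq (xs : List Int) (pred : Int → Bool)
    (hmono : ∀ i j (hi : i < xs.length) (hj : j < xs.length),
        i ≤ j → pred xs[j] = true → pred xs[i] = true) :
    ∀ n lo hi, hi - lo = n → lo ≤ hi → hi ≤ xs.length →
      (∀ i (h : i < xs.length), i < lo → pred xs[i] = true) →
      (∀ i (h : i < xs.length), hi ≤ i → pred xs[i] = false) →
      prefixLenAux xs pred lo hi = xs.countP pred := by
  intro n
  induction n using Nat.strong_induction_on with
  | _ n ih =>
    intro lo hi hn hle hhi hlo' hhi'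
    rw [prefixLenAux]
    by_cases hlt : lo < hi
    · simp only [hlt, dif_pos]
      set mid := (lo + hi) / 2 with hmid
      have hmlo : lo ≤ mid := by omega
      have hmhi : mid < hi := by omega
      have hmlen : mid < xs.length := by omega
      rw [List.getD_eq_getElem xs 0 hmlen]
      by_cases hp : pred xs[mid] = true
      · simp only [hp, if_pos]
        apply ih (hi - (mid + 1)) (by omega) (mid + 1) hi rfl (by omega) hhi
        · intro i h hi'
          exact hmono i mid h hmlen (by omega) hp
        · exact hhi'
      · simp only [hp]
        apply ih (mid - lo) (by omega) lo mid rfl (by omega) (by omega) hlo'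
        intro i h hi'
        by_cases hpi : pred xs[i] = true
        · exact absurd (hmono mid i hmlen h hi' hpi) hp
        · simpa using hpi
    · simp only [hlt, dif_neg, not_false_iff]
      have : lo = hi := by omega
      subst this
      refine (countP_eq_of_iff xs pred lo hhi ?_).symm
      intro i h
      constructor
      · intro hp
        by_contra hge
        have := hhi' i h (by omega)
        simp [this] at hp
      · exact hlo' i h

-- On a sorted list, `_prefix_len` with a ≤-downward-closed predicate counts the
-- elements satisfying it.
lemma prefixLen_eq_countP (xs : List Int) (pred : Int → Bool)
    (hmono : ∀ a b : Int, a ≤ b → pred b = true → pred a = true)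
    (hs : xs.Pairwise (· ≤ ·)) :
    prefixLen xs pred = xs.countP pred := by
  have hidx : ∀ i j (hi : i < xs.length) (hj : j < xs.length),
      i ≤ j → pred xs[j] = true → pred xs[i] = true := by
    intro i j hi hj hij hp
    rcases Nat.lt_or_ge i j with h | h
    · exact hmono _ _ (List.pairwise_iff_getElem.mp hs i j hi hj h) hp
    · have : i = j := by omega
      subst this; exact hp
  exact prefixLenAux_eq xs pred hidx xs.length 0 xs.length (by omega) (by omega)
    (le_refl _) (by intro i h hi'; omega) (by intro i h hi'; omega)

-- A's two counting scans give the same Int as B's two binary searches.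
lemma p_eq (U D : List Int) (c : Int) :
    D.foldl (fun p d => if d > c then p + 1 else p)
      (U.foldl (fun p u => if u < c then p + 1 else p) (0 : Int))
    = (prefixLen (PySem.List.sorted U (fun x => x) false) (fun x => decide (x < c)) : Int)
      + ((PySem.List.sorted D (fun x => x) false).length : Int)
      - (prefixLen (PySem.List.sorted D (fun x => x) false) (fun x => decide (x ≤ c)) : Int) := by
  rw [PySem.List.foldl_ite_add_one (fun u => u < c) U 0,
      PySem.List.foldl_ite_add_one (fun d => d > c) D _]
  rw [prefixLen_eq_countP _ _ (by intro a b hab hb; simp at hb ⊢; omega)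
        (PySem.List.sorted_pairwise U (fun x => x)),
      prefixLen_eq_countP _ _ (by intro a b hab hb; simp at hb ⊢; omega)
        (PySem.List.sorted_pairwise D (fun x => x))]
  rw [(PySem.List.sorted_perm U (fun x => x) false).countP_eq,
      (PySem.List.sorted_perm D (fun x => x) false).countP_eq,
      PySem.List.length_sorted]
  have hsplit : D.length = D.countP (fun x => decide (x ≤ c))
      + D.countP (fun d => decide (d > c)) := by
    rw [List.length_eq_countP_add_countP (fun x => decide (x ≤ c)) (l := D)]
    congr 1
    apply List.countP_congr
    intro a _
    simp
  have h1 : D.countP (fun d => decide (d > c)) ≤ D.length :=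
    List.countP_le_length (p := fun d => decide (d > c)) (l := D)
  omega

lemma solve_eq (Q : Int) (U : List Int) (D : List Int) :
    solve Q U D = solve_alt Q U D := by
  unfold solve solve_alt
  rw [PySem.List.foldl_append_ite (fun u => u < Q) (fun u => u + 1) U [0],
      PySem.List.foldl_append_ite (fun d => d > 0) (fun d => d - 1) D _]
  congr 1
  apply PySem.List.foldl_congr_mem
  intro acc c _
  simp only [p_eq U D c]

-- ===== VERDICT (by name: the statement is the Claim_ definition above) =====
theorem solve_spec : Claim_equal_solve := by
  intro Q U D _
  unfold Spec_solve
  exact solve_eq Q U D
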